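-- pv_equiv track=rewrite | github.com/P-wig/pp-is23423 | Bash2py/packetSizes.py | maximizePacketSum
-- ===== SOURCE A (Python) =====
-- def maximizePacketSum(packetSizes, k):
--     # Write your code here
--     # check constraints
--     n = len(packetSizes)
--     if (k <= 0 or k > n):
--         return -1
--
--     counts = {}
--     window_sum = 0
--     max_sum = -1
--
--     # loop through packetSizes with sliding window of size k
--     for i, val in enumerate(packetSizes):
--         counts[val] = counts.get(val, 0) + 1
--         window_sum += val
--
--         # keep window size k
--         if (i >= k):
--             # remove leftmost element
--             left = packetSizes[i-k]
--             counts[left] -= 1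
--
--             if (counts[left] == 0):
--                 del counts[left]
--             window_sum -= left
--
--         # valid windows of len k and unique values only
--         if (i >= k-1 and len(counts) == k):
--             max_sum = max(max_sum, window_sum)
--
--     return max_sum
-- ===== SOURCE B (Python) =====
-- def maximizePacketSum(packetSizes, k):
--     n = len(packetSizes)
--     if k <= 0 or k > n:
--         return -1
--     max_sum = -1
--     for i in range(n - k + 1):
--         window = packetSizes[i:i + k]
--         if len(set(window)) == k:
--             max_sum = max(max_sum, sum(window))
--     return max_sum
-- ===== Notes on version B (the rewrite author's own statement) =====
-- stated objective: simpler
-- what changed: Each length-k window is recomputed independently with a slice, set() for distinctness and sum(), replacing A's rolling counts dict with incremental add/remove and a maintained window sum.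
import Mathlib
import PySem

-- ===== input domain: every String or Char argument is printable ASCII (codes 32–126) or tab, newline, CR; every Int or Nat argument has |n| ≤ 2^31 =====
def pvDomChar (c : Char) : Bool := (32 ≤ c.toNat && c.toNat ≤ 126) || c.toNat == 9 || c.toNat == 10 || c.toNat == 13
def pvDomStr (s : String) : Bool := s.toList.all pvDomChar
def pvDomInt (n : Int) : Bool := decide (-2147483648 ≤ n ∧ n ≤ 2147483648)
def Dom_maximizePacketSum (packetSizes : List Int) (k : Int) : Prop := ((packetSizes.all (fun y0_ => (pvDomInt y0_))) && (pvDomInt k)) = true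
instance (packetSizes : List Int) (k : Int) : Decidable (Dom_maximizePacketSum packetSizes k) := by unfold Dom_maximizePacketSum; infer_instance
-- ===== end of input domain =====

-- B recomputes each length-k window independently (slice, set() for distinctness, sum()) instead of
-- A's rolling counts dict with an incrementally maintained window sum; objective: simpler, not faster.

-- ===== PORT A =====
-- the body of A's for-loop; the threaded state st is (counts, window_sum, max_sum), p is (i, val)
def pvStepA (packetSizes : List Int) (k : Int)
    (st : PySem.Dict Int Int × Int × Int) (p : Int × Int) : PySem.Dict Int Int × Int × Int :=
  let counts0 := st.1.insert p.2 (st.1.getD p.2 0 + 1)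
  let wsum0 := st.2.1 + p.2
  let cw :=
    if k ≤ p.1 then
      let left := PySem.List.pyGetD packetSizes (p.1 - k) 0
      let counts1 := counts0.modify left 0 (fun c => c - 1)
      let counts2 := if counts1.getD left 0 = 0 then counts1.erase left else counts1
      (counts2, wsum0 - left)
    else (counts0, wsum0)
  let msum := if k - 1 ≤ p.1 ∧ (cw.1.size : Int) = k then max st.2.2 cw.2 else st.2.2
  (cw.1, cw.2, msum)

def maximizePacketSum (packetSizes : List Int) (k : Int) : Int :=
  let n : Int := packetSizes.length
  if k ≤ 0 ∨ n < k then -1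
  else
    ((PySem.List.enumerate packetSizes).foldl (pvStepA packetSizes k)
      (PySem.Dict.empty, 0, -1)).2.2

-- ===== PORT B =====
def maximizePacketSum_alt (packetSizes : List Int) (k : Int) : Int :=
  let n : Int := packetSizes.length
  if k ≤ 0 ∨ n < k then -1
  else
    (PySem.List.pyRange 0 (n - k + 1)).foldl
      (fun max_sum i =>
        let window := PySem.List.slice packetSizes (some i) (some (i + k))
        if ((PySem.Set.ofList window).length : Int) = k then max max_sum window.sum
        else max_sum)
      (-1)

-- ===== PRECONDITION & SPEC =====
def Spec_maximizePacketSum (packetSizes : List Int) (k : Int) (out : Int) : Prop := out = maximizePacketSum_alt packetSizes k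
instance (packetSizes : List Int) (k : Int) (out : Int) : Decidable (Spec_maximizePacketSum packetSizes k out) := by unfold Spec_maximizePacketSum; infer_instance

-- ===== CLAIM (what is proved, stated in full; the proofs are below) =====
def Claim_equal_maximizePacketSum : Prop := ∀ (packetSizes : List Int) (k : Int), Dom_maximizePacketSum packetSizes k → Spec_maximizePacketSum packetSizes k (maximizePacketSum packetSizes k)

-- ===== LEMMAS AND PROOFS =====

lemma pv_find_filter (k v : Int) (l : List (Int × Int)) :
    (l.filter (fun p => !(p.1 == k))).find? (fun p => p.1 == v)
      = if v = k then none else l.find? (fun p => p.1 == v) := by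
  rw [List.find?_filter]
  by_cases hv : v = k
  · subst hv
    simp [List.find?_eq_none]
  · rw [if_neg hv]
    congr 1
    funext a
    by_cases ha : a.1 = v
    · simp [ha, hv]
    · simp [ha]

lemma pv_get?_erase (d : PySem.Dict Int Int) (k v : Int) :
    (d.erase k).get? v = if v = k then none else d.get? v := by
  cases d with
  | mk items =>
    simp only [PySem.Dict.erase, PySem.Dict.get?]
    rw [pv_find_filter]
    split <;> rfl

lemma pv_getD_erase (d : PySem.Dict Int Int) (k v : Int) :
    (d.erase k).getD v 0 = if v = k then 0 else d.getD v 0 := by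
  rw [PySem.Dict.getD_eq_get?_getD, pv_get?_erase, PySem.Dict.getD_eq_get?_getD]
  split <;> rfl

lemma pv_contains_erase (d : PySem.Dict Int Int) (k v : Int) :
    (d.erase k).contains v = (!(v == k) && d.contains v) := by
  rw [PySem.Dict.contains_eq_isSome_get?, pv_get?_erase, PySem.Dict.contains_eq_isSome_get?]
  by_cases hv : v = k <;> simp [hv]

lemma pv_nodup_keys_erase (d : PySem.Dict Int Int) (k : Int)
    (h : d.keys.Nodup) : (d.erase k).keys.Nodup := by
  cases d with
  | mk items =>
    have hsub : ((PySem.Dict.mk (items.filter (fun p => !(p.1 == k)))).keys).Sublist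
        ((PySem.Dict.mk items).keys) := List.Sublist.map _ List.filter_sublist
    exact h.sublist hsub

lemma pv_size_eq (d : PySem.Dict Int Int) (win : List Int) (hnd : d.keys.Nodup)
    (hc : ∀ v, d.contains v = true ↔ v ∈ win) :
    d.size = (PySem.Set.ofList win).length := by
  have hperm : d.keys.Perm (PySem.Set.ofList win) := by
    rw [List.perm_ext_iff_of_nodup hnd (PySem.Set.nodup_ofList win)]
    intro a
    rw [PySem.Set.mem_ofList, ← hc a, PySem.Dict.contains_iff_mem_keys]
  have : d.keys.length = (PySem.Set.ofList win).length := hperm.length_eq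
  simpa [PySem.Dict.keys] using this

def pvWin (xs : List Int) (kn j : Nat) : List Int := (xs.take j).drop (j - kn)

lemma pvWin_zero (xs : List Int) (kn : Nat) : pvWin xs kn 0 = [] := by
  simp [pvWin]

lemma pv_take_succ (xs : List Int) (j : Nat) (x : Int) (rest : List Int)
    (hx : xs.drop j = x :: rest) :
    xs.take (j + 1) = xs.take j ++ [x] := by
  have h : xs[j]? = some x := by
    rw [← List.head?_drop, hx]; rfl
  rw [List.take_add_one, h]; rfl

lemma pvWin_succ_small (xs : List Int) (kn j : Nat) (x : Int) (rest : List Int)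
    (hx : xs.drop j = x :: rest) (h : j < kn) :
    pvWin xs kn (j + 1) = pvWin xs kn j ++ [x] := by
  unfold pvWin
  rw [pv_take_succ xs j x rest hx]
  have h1 : j + 1 - kn = 0 := by omega
  have h2 : j - kn = 0 := by omega
  rw [h1, h2]
  simp

lemma pvWin_succ_big (xs : List Int) (kn j : Nat) (x : Int) (rest : List Int)
    (hx : xs.drop j = x :: rest) (hkn : 0 < kn) (h : kn ≤ j) (hj : j ≤ xs.length) :
    pvWin xs kn (j + 1) = (pvWin xs kn j).tail ++ [x] := by
  unfold pvWin
  rw [pv_take_succ xs j x rest hx, List.drop_append]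
  have hlen : (xs.take j).length = j := List.length_take_of_le hj
  rw [List.tail_drop, hlen]
  have h1 : j + 1 - kn - j = 0 := by omega
  have h2 : j + 1 - kn = j - kn + 1 := by omega
  rw [h1, h2]
  rfl

lemma pvWin_length (xs : List Int) (kn j : Nat) (hj : j ≤ xs.length) :
    (pvWin xs kn j).length = j - (j - kn) := by
  simp [pvWin, List.length_drop, List.length_take]
  omega

lemma pvWin_head (xs : List Int) (kn j : Nat) (hkn : 0 < kn) (h : kn ≤ j) (hj : j ≤ xs.length) :
    pvWin xs kn j = xs.getD (j - kn) 0 :: (pvWin xs kn j).tail := by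
  have hne : pvWin xs kn j ≠ [] := by
    have := pvWin_length xs kn j hj
    intro hn
    rw [hn] at this
    simp at this
    omega
  have hh : (pvWin xs kn j).head? = some (xs.getD (j - kn) 0) := by
    unfold pvWin
    rw [List.head?_drop, List.getElem?_take_of_lt (by omega)]
    have : j - kn < xs.length := by omega
    rw [List.getElem?_eq_getElem this, List.getD_eq_getElem xs 0 this]
  have := List.head?_eq_some_head hne
  rw [this] at hh
  have hx := Option.some.inj hh
  conv_lhs => rw [← List.cons_head_tail hne]
  rw [hx]

lemma pvWin_eq_window (xs : List Int) (kn j : Nat) (h : kn ≤ j + 1) (_hj : j + 1 ≤ xs.length) :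
    pvWin xs kn (j + 1) = (xs.drop (j + 1 - kn)).take kn := by
  unfold pvWin
  rw [List.drop_take]
  congr 1
  omega

def pvInv (xs : List Int) (kn : Nat) (d : PySem.Dict Int Int) (s : Int) (j : Nat) : Prop :=
  d.keys.Nodup ∧
  (∀ v, d.getD v 0 = ((pvWin xs kn j).count v : Int)) ∧
  (∀ v, d.contains v = true ↔ v ∈ pvWin xs kn j) ∧
  s = (pvWin xs kn j).sum

def pvStepB (xs : List Int) (kn : Nat) (m : Int) (w : Nat) : Int :=
  let window := (xs.drop w).take kn
  if (PySem.Set.ofList window).length = kn then max m window.sum else m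

lemma pv_mfinal (xs : List Int) (kn j : Nat) (m S : Int) (h1 : kn ≤ j + 1) (hj : j + 1 ≤ xs.length)
    (C : PySem.Dict Int Int)
    (hnd : C.keys.Nodup) (hct : ∀ v, C.contains v = true ↔ v ∈ pvWin xs kn (j + 1))
    (hS : S = (pvWin xs kn (j + 1)).sum) :
    (if (kn : Int) - 1 ≤ ((j : Nat) : Int) ∧ ((C.size : Nat) : Int) = (kn : Int) then max m S else m)
      = (if kn ≤ j + 1 then pvStepB xs kn m (j + 1 - kn) else m) := by
  rw [if_pos h1]
  simp only [pvStepB]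
  rw [← pvWin_eq_window xs kn j h1 hj]
  have hsize := pv_size_eq _ _ hnd hct
  have hcond1 : (kn : Int) - 1 ≤ ((j : Nat) : Int) := by omega
  by_cases h2 : (PySem.Set.ofList (pvWin xs kn (j + 1))).length = kn
  · rw [if_pos ⟨hcond1, by rw [hsize, h2]⟩, if_pos h2, hS]
  · rw [if_neg, if_neg h2]
    intro hc
    exact h2 (by exact_mod_cast hsize ▸ hc.2)

lemma pvStep_spec (xs : List Int) (kn : Nat) (hkn : 0 < kn) (j : Nat) (x : Int) (rest : List Int)
    (hx : xs.drop j = x :: rest) (hj : j < xs.length)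
    (d : PySem.Dict Int Int) (s m : Int) (hInv : pvInv xs kn d s j) :
    pvInv xs kn (pvStepA xs (kn : Int) (d, s, m) ((j : Int), x)).1
      (pvStepA xs (kn : Int) (d, s, m) ((j : Int), x)).2.1 (j + 1) ∧
    (pvStepA xs (kn : Int) (d, s, m) ((j : Int), x)).2.2
      = (if kn ≤ j + 1 then pvStepB xs kn m (j + 1 - kn) else m) := by
  obtain ⟨hnd, hgd, hct, hs⟩ := hInv
  have hj' : j ≤ xs.length := le_of_lt hj
  by_cases hbig : kn ≤ j
  · -- removal case
    have hb : ((kn : Int) ≤ ((j : Nat) : Int)) := by exact_mod_cast hbig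
    have hcast : ((j : Nat) : Int) - ((kn : Nat) : Int) = ((j - kn : Nat) : Int) := by omega
    have hleft : PySem.List.pyGetD xs (((j : Nat) : Int) - ((kn : Nat) : Int)) 0 = xs.getD (j - kn) 0 := by
      rw [hcast, PySem.List.pyGetD_natCast]
    have hhead := pvWin_head xs kn j hkn hbig hj'
    have hW := pvWin_succ_big xs kn j x rest hx hkn hbig hj'
    simp only [pvStepA, if_pos hb]
    rw [hleft]
    set L := xs.getD (j - kn) 0 with hLdef
    set T := (pvWin xs kn j).tail with hTdef
    have hWj : pvWin xs kn j = L :: T := hhead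
    have hW' : pvWin xs kn (j + 1) = T ++ [x] := hW
    have hgd1 : ∀ v, (d.insert x (d.getD x 0 + 1)).getD v 0
        = (((L :: (T ++ [x])).count v : Nat) : Int) := by
      intro v
      rw [PySem.Dict.getD_insert]
      by_cases hv : v = x
      · rw [if_pos hv, hv, hgd x, hWj]
        simp [List.count_cons, List.count_append]
        omega
      · rw [if_neg hv, hgd v, hWj]
        simp [List.count_cons, List.count_append]
        intro h'
        exact absurd h'.symm hv
    have hgd2 : ∀ v, ((d.insert x (d.getD x 0 + 1)).modify L 0 (fun c => c - 1)).getD v 0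
        = (((pvWin xs kn (j + 1)).count v : Nat) : Int) := by
      intro v
      rw [PySem.Dict.getD_modify, hW']
      by_cases hv : v = L
      · rw [if_pos hv, hv, hgd1 L]
        simp [List.count_cons]
      · rw [if_neg hv, hgd1 v]
        simp [List.count_cons]
        intro h'
        exact absurd h'.symm hv
    have hct2 : ∀ v, ((d.insert x (d.getD x 0 + 1)).modify L 0 (fun c => c - 1)).contains v
        = (v == L || (v == x || d.contains v)) := by
      intro v
      rw [PySem.Dict.contains_modify, PySem.Dict.contains_insert]
    have hnd2 : ((d.insert x (d.getD x 0 + 1)).modify L 0 (fun c => c - 1)).keys.Nodup := by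
      rw [PySem.Dict.keys_modify]
      exact PySem.Dict.nodup_keys_insert _ _ _ (PySem.Dict.nodup_keys_insert _ _ _ hnd)
    have hctmem : ∀ v, v ≠ L →
        (((d.insert x (d.getD x 0 + 1)).modify L 0 (fun c => c - 1)).contains v = true
          ↔ v ∈ pvWin xs kn (j + 1)) := by
      intro v hv
      rw [hct2 v, hW']
      have : v ∈ pvWin xs kn j ↔ v ∈ T := by
        rw [hWj]
        simp [hv]
      simp [hct v, this, hv]
      exact or_comm
    have hsum : s + x - L = (pvWin xs kn (j + 1)).sum := by
      rw [hW', hs, hWj]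
      simp [List.sum_append, List.sum_cons]
      ring
    have h1 : kn ≤ j + 1 := by omega
    by_cases hz : ((d.insert x (d.getD x 0 + 1)).modify L 0 (fun c => c - 1)).getD L 0 = 0
    · rw [if_pos hz]
      have hLnot : L ∉ pvWin xs kn (j + 1) := by
        rw [hgd2 L] at hz
        have : (pvWin xs kn (j + 1)).count L = 0 := by exact_mod_cast hz
        exact List.count_eq_zero.1 this
      have hgd3 : ∀ v, (((d.insert x (d.getD x 0 + 1)).modify L 0 (fun c => c - 1)).erase L).getD v 0
          = (((pvWin xs kn (j + 1)).count v : Nat) : Int) := by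
        intro v
        rw [pv_getD_erase]
        by_cases hv : v = L
        · rw [if_pos hv]
          have h0 : (pvWin xs kn (j + 1)).count L = 0 := List.count_eq_zero.2 hLnot
          rw [hv, h0]
          rfl
        · rw [if_neg hv, hgd2 v]
      have hct3 : ∀ v, ((((d.insert x (d.getD x 0 + 1)).modify L 0 (fun c => c - 1)).erase L).contains v = true
          ↔ v ∈ pvWin xs kn (j + 1)) := by
        intro v
        rw [pv_contains_erase]
        by_cases hv : v = L
        · rw [hv]
          simp [hLnot]
        · simp [hv]
          exact hctmem v hv
      have hnd3 := pv_nodup_keys_erase _ L hnd2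
      exact ⟨⟨hnd3, hgd3, hct3, hsum⟩,
        pv_mfinal xs kn j m (s + x - L) h1 hj _ hnd3 hct3 hsum⟩
    · rw [if_neg hz]
      have hct3 : ∀ v, (((d.insert x (d.getD x 0 + 1)).modify L 0 (fun c => c - 1)).contains v = true
          ↔ v ∈ pvWin xs kn (j + 1)) := by
        intro v
        by_cases hv : v = L
        · rw [hv, hct2 L]
          simp
          rw [hgd2 L] at hz
          have : (pvWin xs kn (j + 1)).count L ≠ 0 := by
            intro h0
            exact hz (by rw [h0]; rfl)
          exact List.count_pos_iff.1 (Nat.pos_of_ne_zero this)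
        · exact hctmem v hv
      exact ⟨⟨hnd2, hgd2, hct3, hsum⟩,
        pv_mfinal xs kn j m (s + x - L) h1 hj _ hnd2 hct3 hsum⟩
  · -- small case: no removal
    have hsm : ¬ ((kn : Int) ≤ ((j : Nat) : Int)) := by exact_mod_cast hbig
    have hW : pvWin xs kn (j + 1) = pvWin xs kn j ++ [x] :=
      pvWin_succ_small xs kn j x rest hx (by omega)
    simp only [pvStepA, if_neg hsm]
    -- state components
    have hgd1 : ∀ v, (d.insert x (d.getD x 0 + 1)).getD v 0 = ((pvWin xs kn (j+1)).count v : Int) := by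
      intro v
      rw [PySem.Dict.getD_insert, hW]
      by_cases hv : v = x
      · subst hv
        simp [List.count_append, hgd v]
      · simp [hv, List.count_append, hgd v, List.count_singleton]
        intro h
        exact absurd h.symm hv
    have hct1 : ∀ v, (d.insert x (d.getD x 0 + 1)).contains v = true ↔ v ∈ pvWin xs kn (j+1) := by
      intro v
      rw [PySem.Dict.contains_insert, hW]
      simp [hct v]
      exact or_comm
    have hnd1 : (d.insert x (d.getD x 0 + 1)).keys.Nodup := PySem.Dict.nodup_keys_insert _ _ _ hnd
    refine ⟨⟨hnd1, hgd1, hct1, by simp [hW, hs]⟩, ?_⟩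
    by_cases h1 : kn ≤ j + 1
    · exact pv_mfinal xs kn j m (s + x) h1 hj _ hnd1 hct1 (by simp [hW, hs])
    · rw [if_neg h1, if_neg]
      intro hc
      have h3 := hc.1
      exact h1 (by omega)

lemma pvLoop (xs : List Int) (kn : Nat) (hkn : 0 < kn) (hn : kn ≤ xs.length) :
    ∀ (ys : List Int) (j : Nat) (d : PySem.Dict Int Int) (s m : Int),
      xs.drop j = ys → j ≤ xs.length → pvInv xs kn d s j →
      ((PySem.List.enumerate ys (j : Int)).foldl (pvStepA xs (kn : Int)) (d, s, m)).2.2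
        = (List.range' (j + 1 - kn) (xs.length - kn + 1 - (j + 1 - kn))).foldl (pvStepB xs kn) m := by
  intro ys
  induction ys with
  | nil =>
    intro j d s m hx hj _
    have hjl : xs.length ≤ j := List.drop_eq_nil_iff.1 hx
    have hc : xs.length - kn + 1 - (j + 1 - kn) = 0 := by omega
    rw [hc]
    rfl
  | cons x rest ih =>
    intro j d s m hx hj hInv
    have hjlt : j < xs.length := by
      have := congrArg List.length hx
      rw [List.length_drop] at this
      simp at this
      omega
    have hstep := pvStep_spec xs kn hkn j x rest hx hjlt d s m hInv
    rw [PySem.List.enumerate_cons, List.foldl_cons]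
    have hcast : ((j : Nat) : Int) + 1 = (((j + 1 : Nat)) : Int) := by push_cast; ring
    rw [hcast]
    have hdrop : xs.drop (j + 1) = rest := by
      rw [← List.tail_drop, hx]
      rfl
    obtain ⟨hInv', hM⟩ := hstep
    have hmain := ih (j + 1) (pvStepA xs (kn : Int) (d, s, m) ((j : Int), x)).1
      (pvStepA xs (kn : Int) (d, s, m) ((j : Int), x)).2.1
      (pvStepA xs (kn : Int) (d, s, m) ((j : Int), x)).2.2 hdrop (by omega) hInv'
    have hmain' : (List.foldl (pvStepA xs (kn : Int)) (pvStepA xs (kn : Int) (d, s, m) ((j : Int), x))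
          (PySem.List.enumerate rest ((j + 1 : Nat) : Int))).2.2
        = List.foldl (pvStepB xs kn) (pvStepA xs (kn : Int) (d, s, m) ((j : Int), x)).2.2
          (List.range' (j + 1 + 1 - kn) (xs.length - kn + 1 - (j + 1 + 1 - kn))) := hmain
    rw [hmain', hM]
    by_cases h1 : kn ≤ j + 1
    · rw [if_pos h1]
      have hc : xs.length - kn + 1 - (j + 1 - kn) = (xs.length - kn + 1 - (j + 1 + 1 - kn)) + 1 := by
        omega
      rw [hc, List.range'_succ, List.foldl_cons]
      have hc2 : j + 1 - kn + 1 = j + 1 + 1 - kn := by omega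
      rw [hc2]
    · rw [if_neg h1]
      have hc : j + 1 - kn = j + 1 + 1 - kn := by omega
      rw [hc]

lemma pv_equiv (packetSizes : List Int) (k : Int) :
    maximizePacketSum packetSizes k = maximizePacketSum_alt packetSizes k := by
  by_cases hg : k ≤ 0 ∨ (packetSizes.length : Int) < k
  · simp only [maximizePacketSum, maximizePacketSum_alt, if_pos hg]
  · have hk0 : 0 < k := by omega
    obtain ⟨kn, rfl⟩ : ∃ kn : Nat, k = (kn : Int) :=
      ⟨k.toNat, (Int.toNat_of_nonneg (by omega)).symm⟩
    rcases not_or.1 hg with ⟨hg1, hg2⟩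
    have hknpos : 0 < kn := by exact_mod_cast hk0
    have hkle : kn ≤ packetSizes.length := by omega
    simp only [maximizePacketSum, maximizePacketSum_alt, if_neg hg]
    have hinv0 : pvInv packetSizes kn PySem.Dict.empty 0 0 := by
      refine ⟨PySem.Dict.nodup_keys_empty, ?_, ?_, ?_⟩
      · intro v
        rw [pvWin_zero]
        simp [PySem.Dict.getD_empty]
      · intro v
        rw [pvWin_zero]
        simp [PySem.Dict.contains_empty]
      · rw [pvWin_zero]
        rfl
    have hA := pvLoop packetSizes kn hknpos hkle packetSizes 0 PySem.Dict.empty 0 (-1)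
      (by rfl) (by omega) hinv0
    have h1kn : 0 + 1 - kn = 0 := by omega
    rw [h1kn] at hA
    simp only [Nat.cast_zero] at hA
    rw [hA]
    have hN : (packetSizes.length : Int) - (kn : Int) + 1
        = ((packetSizes.length - kn + 1 : Nat) : Int) := by push_cast; omega
    rw [hN, PySem.List.pyRange_zero_natCast, List.foldl_map]
    have hfun : (fun (max_sum : Int) (w : Nat) =>
        let window := PySem.List.slice packetSizes (some ((w : Nat) : Int)) (some (((w : Nat) : Int) + (kn : Int)))
        if ((PySem.Set.ofList window).length : Int) = (kn : Int) then max max_sum window.sum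
        else max_sum) = pvStepB packetSizes kn := by
      funext m w
      simp only [PySem.List.slice_natCast_add, pvStepB]
      by_cases h2 : (PySem.Set.ofList ((packetSizes.drop w).take kn)).length = kn
      · rw [if_pos (by exact_mod_cast h2), if_pos h2]
      · rw [if_neg (by exact_mod_cast h2), if_neg h2]
    rw [hfun, List.range_eq_range']
    norm_num

-- ===== VERDICT (by name: the statement is the Claim_ definition above) =====
theorem maximizePacketSum_spec : Claim_equal_maximizePacketSum := by
  intro packetSizes k _
  unfold Spec_maximizePacketSum
  exact pv_equiv packetSizes k
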